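-- pv_equiv track=rewrite | github.com/lornepritchett1-oss/transcript-service | youtube_transcript_service_app.py | detect_special_subtheme
-- ===== SOURCE A (Python) =====
-- SPECIAL_SUBTHEMES = [
--     {
--         "label": "Satan's Strategy Against the Redeemer",
--         "patterns": ["prevent that redeemer", "try to prevent", "coming redeemer", "promised redeemer from coming", "seed of the woman"],
--         "base_theme": "The Defeat of Satan"
--     },
--     {
--         "label": "The Preservation of the Messianic Line",
--         "patterns": ["abel", "seth", "genealogy", "descendant of seth", "god's substitute for abel"],
--         "base_theme": "The Defeat of Satan"
--     },
--     {
--         "label": "Persecution and Apostasy",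
--         "patterns": ["persecute", "massacre", "apostasy", "falling away", "drifting away", "go apostate"],
--         "base_theme": "The Defeat of Satan"
--     },
--     {
--         "label": "Cain and Abel",
--         "patterns": ["cain and abel", "cain", "abel", "murdered his brother", "first murder"],
--         "base_theme": "The Defeat of Satan"
--     },
--     {
--         "label": "The Days of Noah",
--         "patterns": ["days of noah", "noah", "genesis chapter 6", "every imagination", "evil continually"],
--         "base_theme": "The Fall of Man"
--     },
--     {
--         "label": "The Promise in Genesis 3:15",
--         "patterns": ["genesis chapter 3", "genesis 3", "verse 15", "seed of the woman", "crush your head"],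
--         "base_theme": "The Promise of the Redeemer"
--     },
--     {
--         "label": "Creation Under the Curse",
--         "patterns": ["creation groans", "travails in pain", "curse of man's sin", "whole of creation"],
--         "base_theme": "The Curse and Restoration of Creation"
--     },
--     {
--         "label": "Creation Restored in Christ's Reign",
--         "patterns": ["nature restored", "jesus is going to do that", "authority to do that", "restored back the way it was"],
--         "base_theme": "The Curse and Restoration of Creation"
--     },
--     {
--         "label": "The Kingdom Under Attack",
--         "patterns": ["members of god's kingdom", "kingdom of god's dear son", "destroy those people", "transferred out of satan's domain"],
--         "base_theme": "The Kingdom of God"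
--     },
--     {
--         "label": "The Counterattack of God",
--         "patterns": ["how did god counteract", "god counteract", "god had to intervene", "god would keep raising up"],
--         "base_theme": "The Sovereignty of God"
--     }
-- ]
--
-- def detect_special_subtheme(section_text, preferred_base_theme=None):
--     lowered = section_text.lower()
--     matches = []
--
--     for item in SPECIAL_SUBTHEMES:
--         if preferred_base_theme and item["base_theme"] != preferred_base_theme:
--             continue
--
--         score = 0
--         for pattern in item["patterns"]:
--             occurrences = lowered.count(pattern)
--             if occurrences > 0:
--                 score += occurrences * 4
--
--         if score > 0:
--             matches.append((item["label"], score, item["base_theme"]))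
--
--     matches.sort(key=lambda x: (-x[1], x[0]))
--     return matches[0] if matches else None
-- ===== SOURCE B (Python) =====
-- SPECIAL_SUBTHEMES = [
--     {
--         "label": "Satan's Strategy Against the Redeemer",
--         "patterns": ["prevent that redeemer", "try to prevent", "coming redeemer", "promised redeemer from coming", "seed of the woman"],
--         "base_theme": "The Defeat of Satan"
--     },
--     {
--         "label": "The Preservation of the Messianic Line",
--         "patterns": ["abel", "seth", "genealogy", "descendant of seth", "god's substitute for abel"],
--         "base_theme": "The Defeat of Satan"
--     },
--     {
--         "label": "Persecution and Apostasy",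
--         "patterns": ["persecute", "massacre", "apostasy", "falling away", "drifting away", "go apostate"],
--         "base_theme": "The Defeat of Satan"
--     },
--     {
--         "label": "Cain and Abel",
--         "patterns": ["cain and abel", "cain", "abel", "murdered his brother", "first murder"],
--         "base_theme": "The Defeat of Satan"
--     },
--     {
--         "label": "The Days of Noah",
--         "patterns": ["days of noah", "noah", "genesis chapter 6", "every imagination", "evil continually"],
--         "base_theme": "The Fall of Man"
--     },
--     {
--         "label": "The Promise in Genesis 3:15",
--         "patterns": ["genesis chapter 3", "genesis 3", "verse 15", "seed of the woman", "crush your head"],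
--         "base_theme": "The Promise of the Redeemer"
--     },
--     {
--         "label": "Creation Under the Curse",
--         "patterns": ["creation groans", "travails in pain", "curse of man's sin", "whole of creation"],
--         "base_theme": "The Curse and Restoration of Creation"
--     },
--     {
--         "label": "Creation Restored in Christ's Reign",
--         "patterns": ["nature restored", "jesus is going to do that", "authority to do that", "restored back the way it was"],
--         "base_theme": "The Curse and Restoration of Creation"
--     },
--     {
--         "label": "The Kingdom Under Attack",
--         "patterns": ["members of god's kingdom", "kingdom of god's dear son", "destroy those people", "transferred out of satan's domain"],
--         "base_theme": "The Kingdom of God"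
--     },
--     {
--         "label": "The Counterattack of God",
--         "patterns": ["how did god counteract", "god counteract", "god had to intervene", "god would keep raising up"],
--         "base_theme": "The Sovereignty of God"
--     }
-- ]
--
-- def detect_special_subtheme(section_text, preferred_base_theme=None):
--     lowered = section_text.lower()
--     best = None
--     for item in SPECIAL_SUBTHEMES:
--         if preferred_base_theme and item["base_theme"] != preferred_base_theme:
--             continue
--         score = sum(lowered.count(pattern) * 4 for pattern in item["patterns"])
--         if score > 0:
--             label = item["label"]
--             if best is None or (-score, label) < (-best[1], best[0]):
--                 best = (label, score, item["base_theme"])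
--     return best
-- ===== Notes on version B (the rewrite author's own statement) =====
-- stated objective: simpler
-- what changed: Replaces building a list of all scoring matches and sorting it by (-score, label) with a single running-best variable updated in one pass, using the same strict (-score, label) comparison; no intermediate list and no sort.
import Mathlib
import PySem

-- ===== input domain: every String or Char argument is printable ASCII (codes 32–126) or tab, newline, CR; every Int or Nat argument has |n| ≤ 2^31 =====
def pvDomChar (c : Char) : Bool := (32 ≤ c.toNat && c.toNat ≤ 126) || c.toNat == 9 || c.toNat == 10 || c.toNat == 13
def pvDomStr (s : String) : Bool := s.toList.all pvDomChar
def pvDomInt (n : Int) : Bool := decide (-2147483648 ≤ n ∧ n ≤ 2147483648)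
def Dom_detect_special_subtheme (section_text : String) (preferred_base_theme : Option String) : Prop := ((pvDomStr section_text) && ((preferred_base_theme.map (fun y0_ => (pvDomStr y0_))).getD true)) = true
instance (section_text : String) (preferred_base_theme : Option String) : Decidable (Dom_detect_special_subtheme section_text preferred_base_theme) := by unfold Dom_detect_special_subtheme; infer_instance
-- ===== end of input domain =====

-- B replaces the build-list-then-sort selection by a single-pass running best with the same (-score, label) tie-break (objective: simpler).

-- module-level constant shared by both programs: (label, patterns, base_theme)
def SPECIAL_SUBTHEMES : List (String × List String × String) :=
  [ ("Satan's Strategy Against the Redeemer",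
     ["prevent that redeemer", "try to prevent", "coming redeemer", "promised redeemer from coming", "seed of the woman"],
     "The Defeat of Satan"),
    ("The Preservation of the Messianic Line",
     ["abel", "seth", "genealogy", "descendant of seth", "god's substitute for abel"],
     "The Defeat of Satan"),
    ("Persecution and Apostasy",
     ["persecute", "massacre", "apostasy", "falling away", "drifting away", "go apostate"],
     "The Defeat of Satan"),
    ("Cain and Abel",
     ["cain and abel", "cain", "abel", "murdered his brother", "first murder"],
     "The Defeat of Satan"),
    ("The Days of Noah",
     ["days of noah", "noah", "genesis chapter 6", "every imagination", "evil continually"],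
     "The Fall of Man"),
    ("The Promise in Genesis 3:15",
     ["genesis chapter 3", "genesis 3", "verse 15", "seed of the woman", "crush your head"],
     "The Promise of the Redeemer"),
    ("Creation Under the Curse",
     ["creation groans", "travails in pain", "curse of man's sin", "whole of creation"],
     "The Curse and Restoration of Creation"),
    ("Creation Restored in Christ's Reign",
     ["nature restored", "jesus is going to do that", "authority to do that", "restored back the way it was"],
     "The Curse and Restoration of Creation"),
    ("The Kingdom Under Attack",
     ["members of god's kingdom", "kingdom of god's dear son", "destroy those people", "transferred out of satan's domain"],
     "The Kingdom of God"),
    ("The Counterattack of God",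
     ["how did god counteract", "god counteract", "god had to intervene", "god would keep raising up"],
     "The Sovereignty of God") ]

-- ===== PORT A =====
-- `if preferred_base_theme and item["base_theme"] != preferred_base_theme: continue`
-- (a None or empty preferred_base_theme is falsy, so no filtering then); shared by both ports
def pvSkip (preferred_base_theme : Option String) (base : String) : Bool :=
  match preferred_base_theme with
  | none => false
  | some p => p ≠ "" && base ≠ p

def detect_special_subtheme (section_text : String) (preferred_base_theme : Option String) : Option (String × Int × String) :=
  let lowered := PySem.Str.lower section_text
  let ms := SPECIAL_SUBTHEMES.foldl (fun acc item =>
    if pvSkip preferred_base_theme item.2.2 then acc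
    else
      let score : Int := item.2.1.foldl (fun sc pattern =>
        let occurrences : Int := (PySem.Str.count lowered pattern : Int)
        if occurrences > 0 then sc + occurrences * 4 else sc) 0
      if score > 0 then acc ++ [(item.1, score, item.2.2)] else acc) []
  let sortedMs := PySem.List.sorted2 ms (fun x => -x.2.1) (fun x => x.1)
  sortedMs.head?

-- ===== PORT B =====
def detect_special_subtheme_alt (section_text : String) (preferred_base_theme : Option String) : Option (String × Int × String) :=
  let lowered := PySem.Str.lower section_text
  SPECIAL_SUBTHEMES.foldl (fun best item =>
    if pvSkip preferred_base_theme item.2.2 then best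
    else
      let score : Int := (item.2.1.map (fun pattern => (PySem.Str.count lowered pattern : Int) * 4)).sum
      if score > 0 then
        let label := item.1
        match best with
        | none => some (label, score, item.2.2)
        | some b =>
          -- Python tuple compare: (-score, label) < (-best[1], best[0])
          if -score < -b.2.1 || (-score == -b.2.1 && label < b.1) then
            some (label, score, item.2.2)
          else some b
      else best) none

-- ===== PRECONDITION & SPEC =====
def Spec_detect_special_subtheme (section_text : String) (preferred_base_theme : Option String) (out : Option (String × Int × String)) : Prop := out = detect_special_subtheme_alt section_text preferred_base_theme
instance (section_text : String) (preferred_base_theme : Option String) (out : Option (String × Int × String)) : Decidable (Spec_detect_special_subtheme section_text preferred_base_theme out) := by unfold Spec_detect_special_subtheme; infer_instance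

-- ===== CLAIM (what is proved, stated in full; the proofs are below) =====
def Claim_equal_detect_special_subtheme : Prop := ∀ (section_text : String) (preferred_base_theme : Option String), Dom_detect_special_subtheme section_text preferred_base_theme → Spec_detect_special_subtheme section_text preferred_base_theme (detect_special_subtheme section_text preferred_base_theme)

-- ===== LEMMAS AND PROOFS =====

-- the running-minimum step associated with a boolean "strictly before" relation
def pvMinStep {α : Type} (lt : α → α → Bool) (o : Option α) (x : α) : Option α :=
  match o with
  | none => some x
  | some y => if lt x y then some x else some y

theorem pv_head_insertBy {α : Type} (lt : α → α → Bool) (x : α) (acc : List α) :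
    (PySem.List.insertBy lt x acc).head? = pvMinStep lt acc.head? x := by
  cases acc with
  | nil => simp [PySem.List.insertBy, pvMinStep]
  | cons y ys =>
    simp only [PySem.List.insertBy, pvMinStep]
    cases h : lt x y <;> simp [h]

theorem pv_head_foldl_insertBy {α : Type} (lt : α → α → Bool) (ms : List α) :
    ∀ acc : List α,
      (List.foldl (fun acc x => PySem.List.insertBy lt x acc) acc ms).head?
        = List.foldl (pvMinStep lt) acc.head? ms := by
  induction ms with
  | nil => intro acc; simp
  | cons m t ih =>
    intro acc
    simp only [List.foldl]
    rw [ih, pv_head_insertBy]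

-- head of the stable insertion sort = running minimum (first minimal element)
theorem pv_head_sorted2 (ms : List (String × Int × String)) :
    (PySem.List.sorted2 ms (fun x => -x.2.1) (fun x => x.1)).head?
      = List.foldl (pvMinStep (fun a b =>
          decide (-a.2.1 < -b.2.1) || (!decide (-b.2.1 < -a.2.1) && decide (a.1 < b.1)))) none ms := by
  simp only [PySem.List.sorted2]
  exact pv_head_foldl_insertBy _ ms []

theorem pv_score_eq (lowered : String) (pats : List String) : ∀ a : Int,
    pats.foldl (fun sc pattern =>
        let occurrences : Int := (PySem.Str.count lowered pattern : Int)
        if occurrences > 0 then sc + occurrences * 4 else sc) a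
      = a + (pats.map (fun pattern => (PySem.Str.count lowered pattern : Int) * 4)).sum := by
  induction pats with
  | nil => intro a; simp
  | cons p t ih =>
    intro a
    simp only [List.foldl, List.map_cons, List.sum_cons]
    rw [ih]
    have hc : (0 : Int) ≤ (PySem.Str.count lowered p : Int) := Int.natCast_nonneg _
    split_ifs with hp <;> omega

-- B's Python tuple comparison agrees with sorted2's comparator
theorem pv_lt_eq (s bs : Int) (l bl : String) :
    (decide (-s < -bs) || (!decide (-bs < -s) && decide (l < bl)))
      = (decide (-s < -bs) || ((-s == -bs) && decide (l < bl))) := by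
  by_cases h1 : (-s : Int) < -bs
  · simp [h1]
  · by_cases h2 : (-bs : Int) < -s
    · have hne : ¬ ((-s : Int) = -bs) := by omega
      simp [h1, h2, hne]
    · have heq : ((-s : Int) = -bs) := by omega
      simp [heq]

theorem pv_main (lowered : String) (pbt : Option String)
    (lt : (String × Int × String) → (String × Int × String) → Bool)
    (hlt : ∀ a b, lt a b = (decide (-a.2.1 < -b.2.1) || (!decide (-b.2.1 < -a.2.1) && decide (a.1 < b.1))))
    (items : List (String × List String × String)) :
    ∀ (acc : List (String × Int × String)) (best : Option (String × Int × String)),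
      best = List.foldl (pvMinStep lt) none acc →
      List.foldl (pvMinStep lt) none
        (items.foldl (fun acc item =>
          if pvSkip pbt item.2.2 then acc
          else
            let score : Int := item.2.1.foldl (fun sc pattern =>
              let occurrences : Int := (PySem.Str.count lowered pattern : Int)
              if occurrences > 0 then sc + occurrences * 4 else sc) 0
            if score > 0 then acc ++ [(item.1, score, item.2.2)] else acc) acc)
      = items.foldl (fun best item =>
          if pvSkip pbt item.2.2 then best
          else
            let score : Int := (item.2.1.map (fun pattern => (PySem.Str.count lowered pattern : Int) * 4)).sum
            if score > 0 then
              let label := item.1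
              match best with
              | none => some (label, score, item.2.2)
              | some b =>
                if -score < -b.2.1 || (-score == -b.2.1 && label < b.1) then
                  some (label, score, item.2.2)
                else some b
            else best) best := by
  induction items with
  | nil => intro acc best hb; simpa using hb.symm
  | cons item t ih =>
    intro acc best hb
    simp only [List.foldl]
    apply ih
    cases hskip : pvSkip pbt item.2.2 with
    | true => simp only [if_true]; exact hb
    | false =>
      simp only [Bool.false_eq_true, if_false]
      rw [pv_score_eq]
      simp only [Int.zero_add]
      by_cases hpos : (0 : Int) < (item.2.1.map (fun pattern => (PySem.Str.count lowered pattern : Int) * 4)).sum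
      · simp only [gt_iff_lt, if_pos hpos]
        rw [List.foldl_append, ← hb]
        cases best with
        | none => simp [pvMinStep]
        | some b =>
          simp only [List.foldl, pvMinStep]
          rw [hlt, pv_lt_eq]
      · simp only [gt_iff_lt, if_neg hpos]
        exact hb

-- ===== VERDICT (by name: the statement is the Claim_ definition above) =====
theorem detect_special_subtheme_spec : Claim_equal_detect_special_subtheme := by
  intro section_text preferred_base_theme _
  unfold Spec_detect_special_subtheme
  show detect_special_subtheme section_text preferred_base_theme = _
  unfold detect_special_subtheme detect_special_subtheme_alt
  rw [pv_head_sorted2]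
  exact pv_main (PySem.Str.lower section_text) preferred_base_theme _ (fun a b => rfl)
    SPECIAL_SUBTHEMES [] none rfl
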